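-- pv_equiv track=rewrite | github.com/bakunobu/exercise | 1400_basic_tasks/chap_9/ex_9_35.py | min_notes_n
-- ===== SOURCE A (Python) =====
-- def min_notes_n(n:int) -> int:
--     amt = []
--     for x in range(n, n+11):
--         cur_amt = 0
--         for i in range(6, -1, -1):
--             a = x // 2 ** i
--             cur_amt += a
--             x -= a * 2 ** i
--         amt.append(cur_amt)
--     return(amt)
-- ===== SOURCE B (Python) =====
-- def min_notes_n(n: int) -> int:
--     # closed form: denomination 64 takes floor(x/64); the remainder's binary
--     # digits are exactly the greedy counts for 32,16,8,4,2,1 -> popcount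
--     return [x // 64 + (x % 64).bit_count() for x in range(n, n + 11)]
-- ===== Notes on version B (the rewrite author's own statement) =====
-- stated objective: simpler
-- what changed: Replaces the inner 7-step greedy subtraction loop with the closed form x//64 + popcount(x%64), built as a single list comprehension over the same range.
import Mathlib
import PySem

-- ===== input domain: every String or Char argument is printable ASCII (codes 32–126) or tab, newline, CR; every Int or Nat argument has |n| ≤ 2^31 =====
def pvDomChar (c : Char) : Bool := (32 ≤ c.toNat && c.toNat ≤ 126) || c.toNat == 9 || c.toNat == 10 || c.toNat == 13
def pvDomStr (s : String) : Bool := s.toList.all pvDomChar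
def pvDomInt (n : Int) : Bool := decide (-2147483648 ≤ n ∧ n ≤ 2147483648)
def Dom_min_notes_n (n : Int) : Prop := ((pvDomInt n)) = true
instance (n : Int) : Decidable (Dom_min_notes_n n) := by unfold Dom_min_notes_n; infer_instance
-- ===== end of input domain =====

-- B replaces A's inner 7-step greedy subtraction loop by the closed form
-- x // 64 + popcount(x % 64); objective: simpler.

-- ===== PORT A =====
-- inner-loop step: a = x // 2 ** i; cur_amt += a; x -= a * 2 ** i
-- (2 ** i ported as (2 : Int) ^ i.toNat — exact here since i ∈ [0, 6])
def pvStepA (st : Int × Int) (i : Int) : Int × Int :=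
  let a := PySem.Int.floordiv st.2 ((2 : Int) ^ i.toNat)
  (st.1 + a, st.2 - a * (2 : Int) ^ i.toNat)

def min_notes_n (n : Int) : List Int :=
  (PySem.List.pyRange n (n + 11) 1).foldl
    (fun amt x => amt ++ [((PySem.List.pyRange 6 (-1) (-1)).foldl pvStepA (0, x)).1]) []

-- ===== PORT B =====
-- (x % 64).bit_count() ported as PySem.Int.bitCount (mod x 64) — exact: x % 64 ≥ 0
def min_notes_n_alt (n : Int) : List Int :=
  (PySem.List.pyRange n (n + 11) 1).map
    (fun x => PySem.Int.floordiv x 64 + (PySem.Int.bitCount (PySem.Int.mod x 64) : Int))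

-- ===== PRECONDITION & SPEC =====
def Spec_min_notes_n (n : Int) (out : List Int) : Prop := out = min_notes_n_alt n
instance (n : Int) (out : List Int) : Decidable (Spec_min_notes_n n out) := by unfold Spec_min_notes_n; infer_instance

-- ===== CLAIM (what is proved, stated in full; the proofs are below) =====
def Claim_equal_min_notes_n : Prop := ∀ (n : Int), Dom_min_notes_n n → Spec_min_notes_n n (min_notes_n n)

-- ===== LEMMAS AND PROOFS =====

theorem pv_foldl_append_map (f : Int → Int) :
    ∀ (l : List Int) (acc : List Int),
      l.foldl (fun amt x => amt ++ [f x]) acc = acc ++ l.map f := by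
  intro l
  induction l with
  | nil => intro acc; simp
  | cons x l ih => intro acc; simp [ih]

theorem pv_inner_range : PySem.List.pyRange 6 (-1) (-1) = [6, 5, 4, 3, 2, 1, 0] := by decide

-- the accumulator component is additive
theorem pv_step_add :
    ∀ (l : List Int) (c r : Int),
      l.foldl pvStepA (c, r)
        = (c + (l.foldl pvStepA (0, r)).1, (l.foldl pvStepA (0, r)).2) := by
  intro l
  induction l with
  | nil => intro c r; simp
  | cons i l ih =>
    intro c r
    simp only [List.foldl_cons, pvStepA]
    rw [ih, ih (0 + _)]
    simp only [Prod.mk.injEq]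
    exact ⟨by ring, trivial⟩

-- remaining greedy pass on a residue below 64 counts its binary digits
theorem pv_fin_check :
    ∀ m : Nat, m < 64 →
      (([5, 4, 3, 2, 1, 0] : List Int).foldl pvStepA (0, (m : Int))).1
        = (PySem.Int.bitCount ((m : Int)) : Int) := by decide

theorem pv_step_add_fst (l : List Int) (c r : Int) :
    (l.foldl pvStepA (c, r)).1 = c + (l.foldl pvStepA (0, r)).1 := by
  rw [pv_step_add]

theorem pv_inner_eq (x : Int) :
    ((PySem.List.pyRange 6 (-1) (-1)).foldl pvStepA (0, x)).1
      = PySem.Int.floordiv x 64 + (PySem.Int.bitCount (PySem.Int.mod x 64) : Int) := by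
  have h0 : (0 : Int) ≤ PySem.Int.mod x 64 := PySem.Int.mod_nonneg x (by norm_num)
  have h1 : PySem.Int.mod x 64 < 64 := PySem.Int.mod_lt x (by norm_num)
  have hq : PySem.Int.floordiv x 64 * 64 + PySem.Int.mod x 64 = x :=
    PySem.Int.floordiv_mul_add_mod x 64
  have e1 : ((PySem.List.pyRange 6 (-1) (-1)).foldl pvStepA (0, x))
      = (([5, 4, 3, 2, 1, 0] : List Int).foldl pvStepA (pvStepA (0, x) 6)) := by
    rw [pv_inner_range]
    rfl
  have e2 : pvStepA (0, x) 6
      = (PySem.Int.floordiv x 64, x - PySem.Int.floordiv x 64 * 64) := by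
    simp only [pvStepA]
    norm_num [show (6 : Int).toNat = 6 from rfl]
  have hrn : x - PySem.Int.floordiv x 64 * 64 = ((PySem.Int.mod x 64).toNat : Int) := by omega
  rw [e1, e2, pv_step_add_fst, hrn, pv_fin_check (PySem.Int.mod x 64).toNat (by omega),
    Int.toNat_of_nonneg h0]

-- ===== VERDICT (by name: the statement is the Claim_ definition above) =====
theorem min_notes_n_spec : Claim_equal_min_notes_n := by
  intro n _
  show _ = _
  unfold min_notes_n min_notes_n_alt
  rw [pv_foldl_append_map]
  simp only [List.nil_append]
  exact List.map_congr_left (fun x _ => pv_inner_eq x)
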